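-- pv_equiv track=rewrite | github.com/kaushithamsilva/DoH-Synthesis | code/scripts/features.py | extract_features_from_trace
-- ===== SOURCE A (Python) =====
-- def extract_features_from_trace(trace):
--     """
--     Given a trace (a list of integers representing TLS record sizes),
--     extract features as a dictionary containing counts for:
--       - Unigrams: individual TLS record sizes.
--       - Bigrams: pairs of consecutive TLS record sizes.
--       - Burst features: grouping consecutive packets with the same sign.
--     """
--     features = {}
--
--     # 1. Unigrams: count each TLS record size.
--     for token in trace:
--         key = f"U_{token}"
--         features[key] = features.get(key, 0) + 1
--
--     # 2. Bigrams: count each pair of consecutive TLS record sizes.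
--     for i in range(len(trace) - 1):
--         key = f"B_{trace[i]}_{trace[i+1]}"
--         features[key] = features.get(key, 0) + 1
--
--     # 3. Burst features:
--     #    Define a burst as a sequence of consecutive packets with the same sign.
--     bursts = []
--     if trace:
--         current_burst = [trace[0]]
--         for num in trace[1:]:
--             # Check if the current number has the same sign as the last number in current burst.
--             if (num >= 0 and current_burst[-1] >= 0) or (num < 0 and current_burst[-1] < 0):
--                 current_burst.append(num)
--             else:
--                 bursts.append(current_burst)
--                 current_burst = [num]
--         bursts.append(current_burst)
--
--     # Burst Unigrams: use the sum of values in each burst.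
--     burst_unigrams = [sum(burst) for burst in bursts]
--     for token in burst_unigrams:
--         key = f"BU_{token}"
--         features[key] = features.get(key, 0) + 1
--
--     # Burst Bigrams: count consecutive burst sums as pairs.
--     for i in range(len(burst_unigrams) - 1):
--         key = f"BB_{burst_unigrams[i]}_{burst_unigrams[i+1]}"
--         features[key] = features.get(key, 0) + 1
--
--     return features
-- ===== SOURCE B (Python) =====
-- def extract_features_from_trace(trace):
--     """Single-pass variant: one iteration over the trace maintains four
--     counters (unigrams, bigrams, burst unigrams, burst bigrams) plus the
--     running burst state, then merges the counters."""
--     u = {}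
--     b = {}
--     bu = {}
--     bb = {}
--
--     def bump(d, key):
--         d[key] = d.get(key, 0) + 1
--
--     prev = None          # previous token
--     burst_sum = 0        # sum of the current burst
--     burst_neg = False    # sign class of the current burst
--     prev_burst = None    # sum of the previously finished burst
--     for num in trace:
--         bump(u, f"U_{num}")
--         if prev is None:
--             burst_sum = num
--             burst_neg = num < 0
--         else:
--             bump(b, f"B_{prev}_{num}")
--             if (num < 0) == burst_neg:
--                 burst_sum += num
--             else:
--                 bump(bu, f"BU_{burst_sum}")
--                 if prev_burst is not None:
--                     bump(bb, f"BB_{prev_burst}_{burst_sum}")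
--                 prev_burst = burst_sum
--                 burst_sum = num
--                 burst_neg = num < 0
--         prev = num
--     if prev is not None:
--         bump(bu, f"BU_{burst_sum}")
--         if prev_burst is not None:
--             bump(bb, f"BB_{prev_burst}_{burst_sum}")
--
--     features = {}
--     for d in (u, b, bu, bb):
--         features.update(d)
--     return features
-- ===== Notes on version B (the rewrite author's own statement) =====
-- stated objective: alternative
-- what changed: B replaces A's four separate counting passes (unigram pass, index-based bigram pass, burst grouping into an intermediate list-of-lists then two more passes over burst sums) by a single pass over the trace that maintains four counters plus the running burst sum/sign, flushing a burst whenever the sign flips and once at the end, and merges the four counters at the end.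
import Mathlib
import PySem

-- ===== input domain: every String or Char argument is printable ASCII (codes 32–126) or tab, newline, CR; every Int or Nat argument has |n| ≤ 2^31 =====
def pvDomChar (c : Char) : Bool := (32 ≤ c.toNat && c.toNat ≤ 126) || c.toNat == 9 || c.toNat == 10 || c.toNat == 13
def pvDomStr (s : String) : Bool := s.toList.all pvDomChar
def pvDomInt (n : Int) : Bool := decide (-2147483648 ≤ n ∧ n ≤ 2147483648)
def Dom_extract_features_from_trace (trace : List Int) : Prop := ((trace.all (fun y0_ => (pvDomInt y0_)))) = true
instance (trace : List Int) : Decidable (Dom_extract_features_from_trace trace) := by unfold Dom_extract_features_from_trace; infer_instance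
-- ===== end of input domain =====

-- B replaces A's four counting passes (plus an intermediate list-of-bursts) by a single pass
-- over the trace that maintains four counters and the running burst, merged at the end
-- (objective: alternative decomposition; same return value, proved below).

-- ===== PORT A =====
def aBurstLoop : List Int → List Int → List (List Int) → List (List Int)
  | [], cur, bs => bs ++ [cur]
  | num :: rest, cur, bs =>
    if (0 ≤ num ∧ 0 ≤ PySem.List.pyGetD cur (-1) 0) ∨ (num < 0 ∧ PySem.List.pyGetD cur (-1) 0 < 0) then
      aBurstLoop rest (cur ++ [num]) bs
    else
      aBurstLoop rest [num] (bs ++ [cur])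

def extract_features_from_trace (trace : List Int) : List (String × Int) :=
  let features : PySem.Dict String Int := PySem.Dict.empty
  let features := trace.foldl (fun d token =>
      let key := "U_" ++ PySem.Int.toStr token
      d.insert key (d.getD key 0 + 1)) features
  let features := (PySem.List.pyRange 0 (PySem.List.len trace - 1) 1).foldl (fun d i =>
      let key := "B_" ++ PySem.Int.toStr (PySem.List.pyGetD trace i 0) ++ "_" ++
                   PySem.Int.toStr (PySem.List.pyGetD trace (i + 1) 0)
      d.insert key (d.getD key 0 + 1)) features
  let bursts : List (List Int) :=
    match trace with
    | [] => []
    | t :: rest => aBurstLoop rest [t] []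
  let burst_unigrams := bursts.map (fun b => b.sum)
  let features := burst_unigrams.foldl (fun d token =>
      let key := "BU_" ++ PySem.Int.toStr token
      d.insert key (d.getD key 0 + 1)) features
  let features := (PySem.List.pyRange 0 (PySem.List.len burst_unigrams - 1) 1).foldl (fun d i =>
      let key := "BB_" ++ PySem.Int.toStr (PySem.List.pyGetD burst_unigrams i 0) ++ "_" ++
                   PySem.Int.toStr (PySem.List.pyGetD burst_unigrams (i + 1) 0)
      d.insert key (d.getD key 0 + 1)) features
  features.items

-- ===== PORT B =====
def bBump (d : PySem.Dict String Int) (key : String) : PySem.Dict String Int :=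
  d.insert key (d.getD key 0 + 1)

structure BSt where
  u : PySem.Dict String Int
  b : PySem.Dict String Int
  bu : PySem.Dict String Int
  bb : PySem.Dict String Int
  prev : Option Int
  bsum : Int
  bneg : Bool
  pburst : Option Int
deriving Repr

def bLoop : List Int → BSt → BSt
  | [], st => st
  | num :: rest, st =>
    let u := bBump st.u ("U_" ++ PySem.Int.toStr num)
    match st.prev with
    | none =>
        bLoop rest { st with u := u, prev := some num, bsum := num, bneg := decide (num < 0) }
    | some p =>
        let b := bBump st.b ("B_" ++ PySem.Int.toStr p ++ "_" ++ PySem.Int.toStr num)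
        if decide (num < 0) = st.bneg then
          bLoop rest { st with u := u, b := b, prev := some num, bsum := st.bsum + num }
        else
          let bu := bBump st.bu ("BU_" ++ PySem.Int.toStr st.bsum)
          let bb := match st.pburst with
            | none => st.bb
            | some pb => bBump st.bb ("BB_" ++ PySem.Int.toStr pb ++ "_" ++ PySem.Int.toStr st.bsum)
          bLoop rest { u := u, b := b, bu := bu, bb := bb, prev := some num,
                       bsum := num, bneg := decide (num < 0), pburst := some st.bsum }

def extract_features_from_trace_alt (trace : List Int) : List (String × Int) :=
  let st := bLoop trace ⟨PySem.Dict.empty, PySem.Dict.empty, PySem.Dict.empty, PySem.Dict.empty,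
                         none, 0, false, none⟩
  let (bu, bb) :=
    match st.prev with
    | none => (st.bu, st.bb)
    | some _ =>
        let bu := bBump st.bu ("BU_" ++ PySem.Int.toStr st.bsum)
        let bb := match st.pburst with
          | none => st.bb
          | some pb => bBump st.bb ("BB_" ++ PySem.Int.toStr pb ++ "_" ++ PySem.Int.toStr st.bsum)
        (bu, bb)
  ([st.u, st.b, bu, bb].foldl (fun f d => PySem.Dict.update f d.items) PySem.Dict.empty).items

-- ===== PRECONDITION & SPEC =====
def Spec_extract_features_from_trace (trace : List Int) (out : List (String × Int)) : Prop := out = extract_features_from_trace_alt trace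
instance (trace : List Int) (out : List (String × Int)) : Decidable (Spec_extract_features_from_trace trace out) := by unfold Spec_extract_features_from_trace; infer_instance

-- ===== CLAIM (what is proved, stated in full; the proofs are below) =====
def Claim_equal_extract_features_from_trace : Prop := ∀ (trace : List Int), Dom_extract_features_from_trace trace → Spec_extract_features_from_trace trace (extract_features_from_trace trace)

-- ===== LEMMAS AND PROOFS =====
def cnt (ks : List String) (d : PySem.Dict String Int) : PySem.Dict String Int :=
  ks.foldl (fun d k => d.insert k (d.getD k 0 + 1)) d

theorem foldl_key {α : Type} (kf : α → String) (l : List α) (d : PySem.Dict String Int) :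
    l.foldl (fun d x => d.insert (kf x) (d.getD (kf x) 0 + 1)) d = cnt (l.map kf) d := by
  unfold cnt; rw [List.foldl_map]

theorem cnt_nil (d : PySem.Dict String Int) : cnt [] d = d := rfl

theorem cnt_cons (k : String) (ks : List String) (d : PySem.Dict String Int) :
    cnt (k :: ks) d = cnt ks (d.insert k (d.getD k 0 + 1)) := rfl

theorem cnt_append (ks₁ ks₂ : List String) (d : PySem.Dict String Int) :
    cnt (ks₁ ++ ks₂) d = cnt ks₂ (cnt ks₁ d) := List.foldl_append

theorem getLastD_congr (xs : List Int) (h : xs ≠ []) (a b : Int) :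
    xs.getLastD a = xs.getLastD b := by
  cases xs with
  | nil => exact absurd rfl h
  | cons x r => rw [List.getLastD_cons, List.getLastD_cons]

def sumsFrom (s : Int) (c : Bool) : List Int → List Int
  | [] => [s]
  | n :: r => if decide (n < 0) = c then sumsFrom (s + n) c r else s :: sumsFrom n (decide (n < 0)) r

theorem sumsFrom_ne_nil (s : Int) (c : Bool) (l : List Int) : sumsFrom s c l ≠ [] := by
  induction l generalizing s c with
  | nil => simp [sumsFrom]
  | cons n r ih =>
    simp only [sumsFrom]; split
    · exact ih _ _
    · simp

theorem natPairs (t : List Int) :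
    (List.range (t.length - 1)).map (fun k => (t.getD k 0, t.getD (k+1) 0)) = t.zip t.tail := by
  induction t with
  | nil => simp
  | cons x r ih =>
    cases r with
    | nil => simp
    | cons y r' =>
      simp only [List.length_cons, Nat.add_sub_cancel, List.range_succ_eq_map, List.map_cons,
        List.map_map, List.getD_cons_zero, List.getD_cons_succ, List.tail_cons, List.zip_cons_cons]
      refine congrArg _ ?_
      simpa [Function.comp, List.getD_cons_succ] using ih

theorem pyPairs (t : List Int) :
    (PySem.List.pyRange 0 (PySem.List.len t - 1) 1).map
      (fun i => (PySem.List.pyGetD t i 0, PySem.List.pyGetD t (i+1) 0)) = t.zip t.tail := by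
  rw [PySem.List.pyRange_one]
  have h1 : ((PySem.List.len t : Int) - 1 - 0).toNat = t.length - 1 := by
    simp [PySem.List.len_eq]
  rw [List.map_map, h1, ← natPairs t]
  refine List.map_congr_left ?_
  intro k _
  have : (0 : Int) + (k : Int) = ((k : Nat) : Int) := by omega
  simp [Function.comp, this, PySem.List.pyGetD_natCast]
  have h2 : ((k : Int) + 1) = (((k+1 : Nat)) : Int) := by push_cast; ring
  rw [h2, PySem.List.pyGetD_natCast]
  simp [List.getD]

theorem get?_mk_append (pre rest : List (String × Int)) (k : String)
    (h : ∀ p ∈ pre, p.1 ≠ k) :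
    (PySem.Dict.mk (pre ++ rest)).get? k = (PySem.Dict.mk rest).get? k := by
  simp only [PySem.Dict.get?, List.find?_append]
  have : pre.find? (fun p => p.1 == k) = none := by
    rw [List.find?_eq_none]
    intro p hp; simpa using h p hp
  simp [this]

theorem contains_mk_append (pre rest : List (String × Int)) (k : String)
    (h : ∀ p ∈ pre, p.1 ≠ k) :
    (PySem.Dict.mk (pre ++ rest)).contains k = (PySem.Dict.mk rest).contains k := by
  simp only [PySem.Dict.contains, List.any_append]
  have : pre.any (fun p => p.1 == k) = false := by
    simp only [List.any_eq_false]
    intro p hp; simpa using h p hp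
  simp [this]

theorem insert_mk_append (pre : List (String × Int)) (e : PySem.Dict String Int) (k : String) (v : Int)
    (h : ∀ p ∈ pre, p.1 ≠ k) :
    (PySem.Dict.mk (pre ++ e.items)).insert k v = PySem.Dict.mk (pre ++ (e.insert k v).items) := by
  have hc : (PySem.Dict.mk (pre ++ e.items)).contains k = e.contains k :=
    contains_mk_append pre e.items k h
  simp only [PySem.Dict.insert, hc]
  by_cases he : e.contains k = true
  · have hmap : pre.map (fun p => if (p.1 == k) = true then (k, v) else p) = pre := by
      conv_rhs => rw [← List.map_id pre]
      exact List.map_congr_left (fun p hp => by simp [h p hp])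
    simp only [he, if_true, List.map_append, hmap]
  · simp only [Bool.not_eq_true] at he
    simp [he]

theorem getD_mk_append (pre : List (String × Int)) (e : PySem.Dict String Int) (k : String) (dflt : Int)
    (h : ∀ p ∈ pre, p.1 ≠ k) :
    (PySem.Dict.mk (pre ++ e.items)).getD k dflt = e.getD k dflt := by
  simp only [PySem.Dict.getD, get?_mk_append pre e.items k h]

theorem cnt_mk_append (ks : List String) (pre : List (String × Int)) (e : PySem.Dict String Int)
    (h : ∀ k ∈ ks, ∀ p ∈ pre, p.1 ≠ k) :
    cnt ks (PySem.Dict.mk (pre ++ e.items)) = PySem.Dict.mk (pre ++ (cnt ks e).items) := by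
  induction ks generalizing e with
  | nil => rfl
  | cons k ks ih =>
    have hk := h k (by simp)
    rw [cnt, List.foldl_cons, getD_mk_append pre e k 0 hk, insert_mk_append pre e k _ hk]
    exact ih _ (fun k' hk' => h k' (by simp [hk']))

theorem update_mk_append (ps : List (String × Int)) (pre : List (String × Int))
    (h : ∀ q ∈ ps, ∀ p ∈ pre, p.1 ≠ q.1) (hnd : (ps.map Prod.fst).Nodup) :
    PySem.Dict.update (PySem.Dict.mk pre) ps = PySem.Dict.mk (pre ++ ps) := by
  induction ps generalizing pre with
  | nil => simp [PySem.Dict.update]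
  | cons q ps ih =>
    have hq : (PySem.Dict.mk pre).contains q.1 = false := by
      simp only [PySem.Dict.contains, List.any_eq_false]
      intro p hp; simpa using h q (by simp) p hp
    have hins : (PySem.Dict.mk pre).insert q.1 q.2 = PySem.Dict.mk (pre ++ [q]) := by
      simp [PySem.Dict.insert, hq]
    simp only [PySem.Dict.update, List.foldl_cons, hins]
    simp only [List.map_cons, List.nodup_cons] at hnd
    have := ih (pre ++ [q])
      (fun r hr p hp => by
        rcases List.mem_append.mp hp with hp | hp
        · exact h r (by simp [hr]) p hp
        · simp only [List.mem_singleton] at hp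
          subst hp
          intro hqr
          exact hnd.1 (hqr ▸ List.mem_map_of_mem hr)) hnd.2
    simpa [PySem.Dict.update, List.append_assoc] using this

theorem mem_key_cnt (ks : List String) (p : String × Int)
    (hp : p ∈ (cnt ks PySem.Dict.empty).items) : p.1 ∈ ks := by
  have hk : (cnt ks PySem.Dict.empty).keys = PySem.Set.update (PySem.Dict.empty (κ := String) (ν := Int)).keys ks :=
    PySem.Dict.keys_foldl_insert ks _ _
  have : p.1 ∈ (cnt ks PySem.Dict.empty).keys := by
    simp only [PySem.Dict.keys]
    exact List.mem_map_of_mem hp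
  rw [hk] at this
  have he : (PySem.Dict.empty (κ := String) (ν := Int)).keys = [] := rfl
  rw [he] at this
  rw [PySem.Set.update_nil_left] at this
  exact (PySem.Set.mem_ofList _ _).mp this

theorem cnt_keys_nodup (ks : List String) : ((cnt ks PySem.Dict.empty).items.map Prod.fst).Nodup := by
  have := PySem.Dict.nodup_keys_foldl_insert ks
    (fun (d : PySem.Dict String Int) (k : String) => d.getD k 0 + 1) PySem.Dict.empty (by simp [PySem.Dict.empty, PySem.Dict.keys])
  simpa [PySem.Dict.keys, cnt] using this

def uK (n : Int) : String := "U_" ++ PySem.Int.toStr n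
def bK (p n : Int) : String := "B_" ++ PySem.Int.toStr p ++ "_" ++ PySem.Int.toStr n
def buK (n : Int) : String := "BU_" ++ PySem.Int.toStr n
def bbK (p n : Int) : String := "BB_" ++ PySem.Int.toStr p ++ "_" ++ PySem.Int.toStr n

def tag2 (s : String) : List Char := s.toList.take 2

theorem tag2_uK (n : Int) : tag2 (uK n) = ['U', '_'] := by
  have h : ("U_" : String).toList = ['U', '_'] := by decide
  simp [tag2, uK, String.toList_append, h, List.take]

theorem tag2_bK (p n : Int) : tag2 (bK p n) = ['B', '_'] := by
  have h : ("B_" : String).toList = ['B', '_'] := by decide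
  simp [tag2, bK, String.toList_append, h, List.take]

theorem tag2_buK (n : Int) : tag2 (buK n) = ['B', 'U'] := by
  have h : ("BU_" : String).toList = ['B', 'U', '_'] := by decide
  simp [tag2, buK, String.toList_append, h, List.take]

theorem tag2_bbK (p n : Int) : tag2 (bbK p n) = ['B', 'B'] := by
  have h : ("BB_" : String).toList = ['B', 'B', '_'] := by decide
  simp [tag2, bbK, String.toList_append, h, List.take]

theorem uK_ne_bK (a p n : Int) : uK a ≠ bK p n := fun h => by
  have := congrArg tag2 h; rw [tag2_uK, tag2_bK] at this; exact absurd this (by decide)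
theorem uK_ne_buK (a n : Int) : uK a ≠ buK n := fun h => by
  have := congrArg tag2 h; rw [tag2_uK, tag2_buK] at this; exact absurd this (by decide)
theorem uK_ne_bbK (a p n : Int) : uK a ≠ bbK p n := fun h => by
  have := congrArg tag2 h; rw [tag2_uK, tag2_bbK] at this; exact absurd this (by decide)
theorem bK_ne_buK (a b n : Int) : bK a b ≠ buK n := fun h => by
  have := congrArg tag2 h; rw [tag2_bK, tag2_buK] at this; exact absurd this (by decide)
theorem bK_ne_bbK (a b p n : Int) : bK a b ≠ bbK p n := fun h => by
  have := congrArg tag2 h; rw [tag2_bK, tag2_bbK] at this; exact absurd this (by decide)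
theorem buK_ne_bbK (a p n : Int) : buK a ≠ bbK p n := fun h => by
  have := congrArg tag2 h; rw [tag2_buK, tag2_bbK] at this; exact absurd this (by decide)

theorem zp_concat (xs : List Int) (y : Int) (h : xs ≠ []) :
    (xs ++ [y]).zip ((xs ++ [y]).tail) = xs.zip xs.tail ++ [(xs.getLastD 0, y)] := by
  induction xs with
  | nil => exact absurd rfl h
  | cons x r ih =>
    cases r with
    | nil => simp
    | cons z r' =>
      have := ih (by simp)
      simp only [List.cons_append, List.tail_cons, List.zip_cons_cons, List.getLastD_cons] at *
      rw [this]

theorem pyGetD_neg_one_eq_getLastD (cur : List Int) (h : cur ≠ []) :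
    PySem.List.pyGetD cur (-1) 0 = cur.getLastD 0 := by
  have := PySem.List.pyGetD_neg_one (xs := cur) (d := 0) h
  rw [this]
  cases cur with
  | nil => exact absurd rfl h
  | cons x r =>
    simp only [List.getLast_eq_getLastD]
    cases r with
    | nil => simp
    | cons y t =>
      simp only [List.getLastD_eq_getLast?]
      rw [List.getLast?_cons_cons, List.getLast?_eq_some_getLast (l := y :: t) (by simp)]
      rfl

theorem sumsFrom_cons (s : Int) (c : Bool) (n : Int) (r : List Int) :
    sumsFrom s c (n :: r)
      = if decide (n < 0) = c then sumsFrom (s + n) c r else s :: sumsFrom n (decide (n < 0)) r := rfl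

theorem aBurstLoop_sums : ∀ (l cur : List Int) (bs : List (List Int)), cur ≠ [] →
    (aBurstLoop l cur bs).map List.sum
      = bs.map List.sum ++ sumsFrom cur.sum (decide (cur.getLastD 0 < 0)) l := by
  intro l
  induction l with
  | nil => intro cur bs h; simp [aBurstLoop, sumsFrom]
  | cons num rest ih =>
    intro cur bs h
    rw [aBurstLoop, pyGetD_neg_one_eq_getLastD cur h]
    by_cases hc : (0 ≤ num ∧ 0 ≤ cur.getLastD 0) ∨ (num < 0 ∧ cur.getLastD 0 < 0)
    · rw [if_pos hc]
      have hsign : decide (num < 0) = decide (cur.getLastD 0 < 0) := by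
        rw [decide_eq_decide]; omega
      have hlast : (cur ++ [num]).getLastD 0 = num := by simp
      rw [ih (cur ++ [num]) bs (by simp), hlast, sumsFrom_cons, if_pos hsign, ← hsign,
        List.sum_append]
      simp
    · rw [if_neg hc]
      have hsign : decide (num < 0) ≠ decide (cur.getLastD 0 < 0) := by
        simp only [ne_eq, decide_eq_decide]; omega
      have hlast : List.getLastD [num] 0 = num := rfl
      rw [ih [num] (bs ++ [cur]) (by simp), hlast, sumsFrom_cons, if_neg hsign]
      simp [List.map_append]

theorem bLoop_spec : ∀ (l : List Int) (u b bu bb : PySem.Dict String Int) (p s : Int) (pb : Option Int),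
    bLoop l ⟨u, b, bu, bb, some p, s, decide (p < 0), pb⟩ =
      ⟨cnt (l.map uK) u,
       cnt (((p :: l).zip l).map (fun q => bK q.1 q.2)) b,
       cnt ((sumsFrom s (decide (p < 0)) l).dropLast.map buK) bu,
       cnt (((pb.toList ++ (sumsFrom s (decide (p < 0)) l).dropLast).zip
               (pb.toList ++ (sumsFrom s (decide (p < 0)) l).dropLast).tail).map
             (fun q => bbK q.1 q.2)) bb,
       some ((p :: l).getLastD 0),
       (sumsFrom s (decide (p < 0)) l).getLastD 0,
       (bLoop l ⟨u, b, bu, bb, some p, s, decide (p < 0), pb⟩).bneg,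
       (pb.toList ++ (sumsFrom s (decide (p < 0)) l).dropLast).getLast?⟩ := by
  intro l
  induction l with
  | nil =>
    intro u b bu bb p s pb
    simp only [bLoop, sumsFrom, List.map_nil, cnt_nil, List.zip_nil_right]
    cases pb <;> rfl
  | cons num rest ih =>
    intro u b bu bb p s pb
    by_cases hsign : decide (num < 0) = decide (p < 0)
    · -- same sign class: burst extends
      rw [show bLoop (num :: rest) ⟨u, b, bu, bb, some p, s, decide (p < 0), pb⟩
            = bLoop rest ⟨bBump u ("U_" ++ PySem.Int.toStr num),
                bBump b ("B_" ++ PySem.Int.toStr p ++ "_" ++ PySem.Int.toStr num), bu, bb,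
                some num, s + num, decide (p < 0), pb⟩ by
        simp [bLoop, hsign]]
      rw [show (decide (p < 0)) = (decide (num < 0)) from hsign.symm]
      rw [ih _ _ _ _ num (s + num) pb]
      rw [sumsFrom_cons, if_pos (by rw [hsign])]
      simp only [List.map_cons, cnt_cons, List.zip_cons_cons, List.getLastD_cons]
      rfl
    · -- sign flips: burst is flushed
      rw [show bLoop (num :: rest) ⟨u, b, bu, bb, some p, s, decide (p < 0), pb⟩
            = bLoop rest ⟨bBump u ("U_" ++ PySem.Int.toStr num),
                bBump b ("B_" ++ PySem.Int.toStr p ++ "_" ++ PySem.Int.toStr num),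
                bBump bu ("BU_" ++ PySem.Int.toStr s),
                (match pb with
                 | none => bb
                 | some q => bBump bb ("BB_" ++ PySem.Int.toStr q ++ "_" ++ PySem.Int.toStr s)),
                some num, num, decide (num < 0), some s⟩ by
        simp [bLoop, hsign]]
      rw [ih _ _ _ _ num num (some s)]
      rw [sumsFrom_cons, if_neg hsign]
      have hne := sumsFrom_ne_nil num (decide (num < 0)) rest
      rw [List.dropLast_cons_of_ne_nil hne]
      simp only [List.map_cons, cnt_cons, List.zip_cons_cons, List.getLastD_cons]
      rw [getLastD_congr (sumsFrom num (decide (num < 0)) rest) hne s 0]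
      cases pb with
      | none =>
        simp only [Option.toList_none, List.nil_append, List.tail_cons]
        rfl
      | some q =>
        simp only [Option.toList_some, List.cons_append, List.tail_cons, List.zip_cons_cons,
          List.map_cons, cnt_cons, List.nil_append, List.getLast?_cons_cons]
        rfl

theorem pairFold (key2 : Int → Int → String) (t : List Int) (d : PySem.Dict String Int) :
    (PySem.List.pyRange 0 (PySem.List.len t - 1) 1).foldl
      (fun d i => d.insert (key2 (PySem.List.pyGetD t i 0) (PySem.List.pyGetD t (i+1) 0))
        (d.getD (key2 (PySem.List.pyGetD t i 0) (PySem.List.pyGetD t (i+1) 0)) 0 + 1)) d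
    = cnt ((t.zip t.tail).map (fun q => key2 q.1 q.2)) d := by
  rw [foldl_key (fun i => key2 (PySem.List.pyGetD t i 0) (PySem.List.pyGetD t (i+1) 0))]
  rw [← pyPairs t, List.map_map]
  rfl

theorem dropLast_concat_getLastD (xs : List Int) (h : xs ≠ []) :
    xs.dropLast ++ [xs.getLastD 0] = xs := by
  induction xs with
  | nil => exact absurd rfl h
  | cons x r ih =>
    cases r with
    | nil => rfl
    | cons y t =>
      rw [List.dropLast_cons_of_ne_nil (by simp), List.getLastD_cons,
        getLastD_congr (y :: t) (by simp) x 0, List.cons_append, ih (by simp)]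

theorem cnt_fresh_top (ks : List String) (d : PySem.Dict String Int)
    (h : ∀ k ∈ ks, ∀ p ∈ d.items, p.1 ≠ k) :
    cnt ks d = PySem.Dict.mk (d.items ++ (cnt ks PySem.Dict.empty).items) := by
  have h0 : d = PySem.Dict.mk (d.items ++ (PySem.Dict.empty (κ := String) (ν := Int)).items) := by
    cases d with | mk items => simp [PySem.Dict.empty]
  conv_lhs => rw [h0]
  exact cnt_mk_append ks d.items PySem.Dict.empty h

def burstS : List Int → List Int
  | [] => []
  | h :: r => sumsFrom h (decide (h < 0)) r

def quad (t : List Int) : List (String × Int) :=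
  (cnt (t.map uK) PySem.Dict.empty).items
  ++ (cnt ((t.zip t.tail).map (fun q => bK q.1 q.2)) PySem.Dict.empty).items
  ++ (cnt ((burstS t).map buK) PySem.Dict.empty).items
  ++ (cnt (((burstS t).zip (burstS t).tail).map (fun q => bbK q.1 q.2)) PySem.Dict.empty).items

theorem cnt_quad (KU KB KBU KBB : List String)
    (hU : ∀ k ∈ KU, ∃ m, k = uK m) (hB : ∀ k ∈ KB, ∃ a b, k = bK a b)
    (hBU : ∀ k ∈ KBU, ∃ m, k = buK m) (hBB : ∀ k ∈ KBB, ∃ a b, k = bbK a b) :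
    (cnt KBB (cnt KBU (cnt KB (cnt KU PySem.Dict.empty)))).items
      = (cnt KU PySem.Dict.empty).items ++ (cnt KB PySem.Dict.empty).items
        ++ (cnt KBU PySem.Dict.empty).items ++ (cnt KBB PySem.Dict.empty).items := by
  have hUp : ∀ p ∈ (cnt KU (PySem.Dict.empty (κ := String) (ν := Int))).items, ∃ m, p.1 = uK m :=
    fun p hp => hU p.1 (mem_key_cnt KU p hp)
  have hBp : ∀ p ∈ (cnt KB (PySem.Dict.empty (κ := String) (ν := Int))).items, ∃ a b, p.1 = bK a b :=
    fun p hp => hB p.1 (mem_key_cnt KB p hp)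
  have hBUp : ∀ p ∈ (cnt KBU (PySem.Dict.empty (κ := String) (ν := Int))).items, ∃ m, p.1 = buK m :=
    fun p hp => hBU p.1 (mem_key_cnt KBU p hp)
  rw [cnt_fresh_top KB (cnt KU PySem.Dict.empty) (by
    intro k hk p hp
    obtain ⟨a, b, rfl⟩ := hB k hk
    obtain ⟨m, hm⟩ := hUp p hp
    rw [hm]; exact uK_ne_bK m a b)]
  rw [cnt_fresh_top KBU _ (by
    intro k hk p hp
    obtain ⟨m, rfl⟩ := hBU k hk
    rcases List.mem_append.mp hp with hp | hp
    · obtain ⟨a, ha⟩ := hUp p hp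
      rw [ha]; exact uK_ne_buK a m
    · obtain ⟨a, b, ha⟩ := hBp p hp
      rw [ha]; exact bK_ne_buK a b m)]
  rw [cnt_fresh_top KBB _ (by
    intro k hk p hp
    obtain ⟨a, b, rfl⟩ := hBB k hk
    rcases List.mem_append.mp hp with hp | hp
    · rcases List.mem_append.mp hp with hp | hp
      · obtain ⟨m, hm⟩ := hUp p hp
        rw [hm]; exact uK_ne_bbK m a b
      · obtain ⟨x, y, hm⟩ := hBp p hp
        rw [hm]; exact bK_ne_bbK x y a b
    · obtain ⟨m, hm⟩ := hBUp p hp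
      rw [hm]; exact buK_ne_bbK m a b)]

theorem update_empty_items (ps : List (String × Int)) (hnd : (ps.map Prod.fst).Nodup) :
    PySem.Dict.update PySem.Dict.empty ps = PySem.Dict.mk ps := by
  have h := update_mk_append ps [] (fun q _ p hp => absurd hp (List.not_mem_nil)) hnd
  rw [List.nil_append] at h
  exact h

theorem mem_key_cnt' (ks : List String) (d : PySem.Dict String Int) (p : String × Int)
    (hp : p ∈ (cnt ks d).items) : p.1 ∈ d.keys ∨ p.1 ∈ ks := by
  have hk : (cnt ks d).keys = PySem.Set.update d.keys ks :=
    PySem.Dict.keys_foldl_insert ks _ d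
  have h1 : p.1 ∈ (cnt ks d).keys := List.mem_map_of_mem hp
  rw [hk] at h1
  simpa [PySem.Set.mem_update] using h1

theorem cnt_keys_nodup' (ks : List String) (d : PySem.Dict String Int)
    (h : (d.items.map Prod.fst).Nodup) : ((cnt ks d).items.map Prod.fst).Nodup := by
  have := PySem.Dict.nodup_keys_foldl_insert ks
    (fun (d : PySem.Dict String Int) (k : String) => d.getD k 0 + 1) d (by simpa [PySem.Dict.keys] using h)
  simpa [PySem.Dict.keys, cnt] using this

theorem update_quad (U B BU BB : PySem.Dict String Int)
    (hU : ∀ p ∈ U.items, ∃ m, p.1 = uK m) (hB : ∀ p ∈ B.items, ∃ a b, p.1 = bK a b)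
    (hBU : ∀ p ∈ BU.items, ∃ m, p.1 = buK m) (hBB : ∀ p ∈ BB.items, ∃ a b, p.1 = bbK a b)
    (hndU : (U.items.map Prod.fst).Nodup) (hndB : (B.items.map Prod.fst).Nodup)
    (hndBU : (BU.items.map Prod.fst).Nodup) (hndBB : (BB.items.map Prod.fst).Nodup) :
    ([U, B, BU, BB].foldl (fun f d => PySem.Dict.update f d.items) PySem.Dict.empty).items
      = U.items ++ B.items ++ BU.items ++ BB.items := by
  simp only [List.foldl_cons, List.foldl_nil]
  rw [update_empty_items _ hndU]
  rw [update_mk_append _ _ (by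
      intro q hq p hp
      obtain ⟨a, b, hq'⟩ := hB q hq
      obtain ⟨m, hm⟩ := hU p hp
      rw [hm, hq']; exact uK_ne_bK m a b) hndB]
  rw [update_mk_append _ _ (by
      intro q hq p hp
      obtain ⟨m, hq'⟩ := hBU q hq
      rcases List.mem_append.mp hp with hp | hp
      · obtain ⟨a, ha⟩ := hU p hp
        rw [ha, hq']; exact uK_ne_buK a m
      · obtain ⟨a, b, ha⟩ := hB p hp
        rw [ha, hq']; exact bK_ne_buK a b m) hndBU]
  rw [update_mk_append _ _ (by
      intro q hq p hp
      obtain ⟨a, b, hq'⟩ := hBB q hq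
      rcases List.mem_append.mp hp with hp | hp
      · rcases List.mem_append.mp hp with hp | hp
        · obtain ⟨m, hm⟩ := hU p hp
          rw [hm, hq']; exact uK_ne_bbK m a b
        · obtain ⟨x, y, hm⟩ := hB p hp
          rw [hm, hq']; exact bK_ne_bbK x y a b
      · obtain ⟨m, hm⟩ := hBU p hp
        rw [hm, hq']; exact buK_ne_bbK m a b) hndBB]

theorem A_eq_quad (t : List Int) : extract_features_from_trace t = quad t := by
  cases t with
  | nil => rfl
  | cons h r =>
    simp only [extract_features_from_trace]
    rw [foldl_key (fun token => "U_" ++ PySem.Int.toStr token)]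
    rw [pairFold (fun a b => "B_" ++ PySem.Int.toStr a ++ "_" ++ PySem.Int.toStr b)]
    have hbs : (aBurstLoop r [h] []).map (fun b => b.sum) = burstS (h :: r) := by
      have := aBurstLoop_sums r [h] [] (by simp)
      simpa [burstS] using this
    rw [hbs]
    rw [foldl_key (fun token => "BU_" ++ PySem.Int.toStr token)]
    rw [pairFold (fun a b => "BB_" ++ PySem.Int.toStr a ++ "_" ++ PySem.Int.toStr b)]
    refine Eq.trans (cnt_quad _ _ _ _ ?_ ?_ ?_ ?_) ?_
    · intro k hk
      obtain ⟨m, _, rfl⟩ := List.mem_map.mp hk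
      exact ⟨m, rfl⟩
    · intro k hk
      obtain ⟨q, _, rfl⟩ := List.mem_map.mp hk
      exact ⟨q.1, q.2, rfl⟩
    · intro k hk
      obtain ⟨m, _, rfl⟩ := List.mem_map.mp hk
      exact ⟨m, rfl⟩
    · intro k hk
      obtain ⟨q, _, rfl⟩ := List.mem_map.mp hk
      exact ⟨q.1, q.2, rfl⟩
    · rfl

theorem getLast_eq_getLastD0 (xs : List Int) (h : xs ≠ []) : xs.getLast h = xs.getLastD 0 := by
  cases xs with
  | nil => exact absurd rfl h
  | cons x r => rw [List.getLast_eq_getLastD, List.getLastD_cons]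

theorem getLast?_eq_some_getLastD (xs : List Int) (h : xs ≠ []) :
    xs.getLast? = some (xs.getLastD 0) := by
  rw [List.getLast?_eq_some_getLast (h := h), getLast_eq_getLastD0 xs h]


set_option maxHeartbeats 1000000 in
theorem B_eq_quad (t : List Int) : extract_features_from_trace_alt t = quad t := by
  cases t with
  | nil => rfl
  | cons h r =>
    simp only [extract_features_from_trace_alt]
    rw [show bLoop (h :: r) ⟨PySem.Dict.empty, PySem.Dict.empty, PySem.Dict.empty, PySem.Dict.empty,
            none, 0, false, none⟩
          = bLoop r ⟨bBump PySem.Dict.empty ("U_" ++ PySem.Int.toStr h), PySem.Dict.empty,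
              PySem.Dict.empty, PySem.Dict.empty, some h, h, decide (h < 0), none⟩ from by
        simp [bLoop]]
    rw [bLoop_spec r _ _ _ _ h h none]
    simp only [Option.toList_none, List.nil_append, quad, burstS, List.tail_cons]
    have hneS := sumsFrom_ne_nil h (decide (h < 0)) r
    split
    · -- trace is a single burst: nothing was flushed during the loop
      rename_i heq
      obtain ⟨g, hg⟩ : ∃ g, sumsFrom h (decide (h < 0)) r = [g] := by
        have hdl : (sumsFrom h (decide (h < 0)) r).dropLast = [] := List.getLast?_eq_none_iff.mp heq
        cases hS : sumsFrom h (decide (h < 0)) r with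
        | nil => exact absurd hS hneS
        | cons a s =>
          cases s with
          | nil => exact ⟨a, rfl⟩
          | cons b u => rw [hS] at hdl; simp at hdl
      rw [hg]
      simp only [List.dropLast, List.map_nil, cnt_nil, List.getLastD_cons, List.getLastD_nil,
        List.map_cons, cnt_cons]
      refine Eq.trans (update_quad _ _ _ _ ?_ ?_ ?_ ?_ ?_ ?_ ?_ ?_) ?_
      · intro p hp
        rcases mem_key_cnt' _ _ p hp with hk | hk
        · refine ⟨h, ?_⟩
          simpa [bBump, PySem.Dict.insert, PySem.Dict.contains, PySem.Dict.empty,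
            PySem.Dict.keys] using hk
        · obtain ⟨m, _, hm⟩ := List.mem_map.mp hk; exact ⟨m, hm.symm⟩
      · intro p hp
        obtain ⟨q, _, hq⟩ := List.mem_map.mp (mem_key_cnt _ p hp)
        exact ⟨q.1, q.2, hq.symm⟩
      · intro p hp
        simp [bBump, PySem.Dict.insert, PySem.Dict.contains, PySem.Dict.empty] at hp
        subst hp
        exact ⟨g, rfl⟩
      · intro p hp
        simp [cnt, PySem.Dict.empty] at hp
      · exact cnt_keys_nodup' _ _ (by
          simp [bBump, PySem.Dict.insert, PySem.Dict.contains, PySem.Dict.empty])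
      · exact cnt_keys_nodup _
      · simp [bBump, PySem.Dict.insert, PySem.Dict.contains, PySem.Dict.empty]
      · simp [cnt, PySem.Dict.empty]
      · rfl
    · -- at least two bursts
      rename_i pb heq
      generalize hS : sumsFrom h (decide (h < 0)) r = S at heq hneS ⊢
      obtain ⟨dl, g, rfl⟩ : ∃ dl g, S = dl ++ [g] :=
        ⟨S.dropLast, S.getLastD 0, (dropLast_concat_getLastD S hneS).symm⟩
      rw [List.dropLast_concat] at heq ⊢
      have hdlne : dl ≠ [] := by
        intro e; rw [e] at heq; simp at heq
      rw [getLast?_eq_some_getLastD dl hdlne] at heq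
      obtain rfl : pb = dl.getLastD 0 := (Option.some.injEq _ _).mp heq.symm
      rw [show ((dl ++ [g]).getLastD 0) = g from by
        simp [List.getLastD_eq_getLast?]]
      refine Eq.trans (update_quad _ _ _ _ ?_ ?_ ?_ ?_ ?_ ?_ ?_ ?_) ?_
      · intro p hp
        rcases mem_key_cnt' _ _ p hp with hk | hk
        · refine ⟨h, ?_⟩
          simpa [bBump, PySem.Dict.insert, PySem.Dict.contains, PySem.Dict.empty,
            PySem.Dict.keys] using hk
        · obtain ⟨m, _, hm⟩ := List.mem_map.mp hk; exact ⟨m, hm.symm⟩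
      · intro p hp
        obtain ⟨q, _, hq⟩ := List.mem_map.mp (mem_key_cnt _ p hp)
        exact ⟨q.1, q.2, hq.symm⟩
      · intro p hp
        rcases (PySem.Dict.mem_items_insert _ _ _ _).mp hp with hp | ⟨hp, _⟩
        · exact ⟨g, by rw [hp]; rfl⟩
        · obtain ⟨m, _, hm⟩ := List.mem_map.mp (mem_key_cnt _ p hp); exact ⟨m, hm.symm⟩
      · intro p hp
        rcases (PySem.Dict.mem_items_insert _ _ _ _).mp hp with hp | ⟨hp, _⟩
        · exact ⟨dl.getLastD 0, g, by rw [hp]; rfl⟩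
        · obtain ⟨q, _, hq⟩ := List.mem_map.mp (mem_key_cnt _ p hp)
          exact ⟨q.1, q.2, hq.symm⟩
      · exact cnt_keys_nodup' _ _ (by
          simp [bBump, PySem.Dict.insert, PySem.Dict.contains, PySem.Dict.empty])
      · exact cnt_keys_nodup _
      · have := PySem.Dict.nodup_keys_insert (d := cnt (dl.map buK) PySem.Dict.empty)
          (k := "BU_" ++ PySem.Int.toStr g) (v := (cnt (dl.map buK) PySem.Dict.empty).getD ("BU_" ++ PySem.Int.toStr g) 0 + 1)
          (by simpa [PySem.Dict.keys] using cnt_keys_nodup (dl.map buK))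
        simpa [bBump, PySem.Dict.keys] using this
      · have := PySem.Dict.nodup_keys_insert
          (d := cnt ((dl.zip dl.tail).map (fun q => bbK q.1 q.2)) PySem.Dict.empty)
          (k := "BB_" ++ PySem.Int.toStr (dl.getLastD 0) ++ "_" ++ PySem.Int.toStr g)
          (v := (cnt ((dl.zip dl.tail).map (fun q => bbK q.1 q.2)) PySem.Dict.empty).getD
            ("BB_" ++ PySem.Int.toStr (dl.getLastD 0) ++ "_" ++ PySem.Int.toStr g) 0 + 1)
          (by simpa [PySem.Dict.keys] using cnt_keys_nodup ((dl.zip dl.tail).map (fun q => bbK q.1 q.2)))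
        simpa [bBump, PySem.Dict.keys] using this
      · rw [zp_concat dl g hdlne, List.map_append, List.map_append, cnt_append, cnt_append,
          List.map_cons, cnt_cons]
        rfl

-- ===== VERDICT (by name: the statement is the Claim_ definition above) =====
theorem extract_features_from_trace_spec : Claim_equal_extract_features_from_trace := by
  intro trace _
  unfold Spec_extract_features_from_trace
  rw [A_eq_quad trace, B_eq_quad trace]
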